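-- pv_equiv track=rewrite | github.com/leaffan/pynhldb | standings.py | group_records
-- ===== SOURCE A (Python) =====
-- from itertools import groupby
--
-- def group_records(records):
--     """
--     Groups records by league, conference and division.
--     """
--     grouped_records = dict()
--     # grouping records by league
--     grouped_records['league'] = records
--     # grouping records by conference
--     for value, group in groupby(records.items(), lambda x: x[1]['conference']):
--         if value not in grouped_records:
--             grouped_records[value] = dict()
--         grouped_records[value].update(group)
--     # grouping records by division
--     for value, group in groupby(records.items(), lambda x: x[1]['division']):
--         if value not in grouped_records:
--             grouped_records[value] = dict()
--         grouped_records[value].update(group)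
--
--     return grouped_records
-- ===== SOURCE B (Python) =====
-- def group_records(records):
--     """
--     Groups records by league, conference and division.
--
--     Alternative decomposition: first compute the ordered list of group names
--     (league, then conferences, then divisions, in first-encounter order), then
--     build each group directly by filtering the records.  Return value matches
--     the original; the original's (value-invisible) in-place update of `records`
--     when a conference/division is literally named 'league' is not performed.
--     """
--     grouped = {}
--     names = ['league']
--     for v in records.values():
--         if v['conference'] not in names:
--             names.append(v['conference'])
--     for v in records.values():
--         if v['division'] not in names:
--             names.append(v['division'])
--     for name in names:
--         if name == 'league':
--             grouped[name] = records
--         else: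
--             g = {k: v for k, v in records.items() if v['conference'] == name}
--             g.update((k, v) for k, v in records.items() if v['division'] == name)
--             grouped[name] = g
--     return grouped
-- ===== Notes on version B (the rewrite author's own statement) =====
-- stated objective: alternative
-- what changed: Instead of two itertools.groupby passes that distribute consecutive runs of records into incrementally updated group dicts, B first computes the ordered list of group names (league, then conference names, then division names, in first-encounter order) and then builds each group in one shot by filtering the records for that name.
import Mathlib
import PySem

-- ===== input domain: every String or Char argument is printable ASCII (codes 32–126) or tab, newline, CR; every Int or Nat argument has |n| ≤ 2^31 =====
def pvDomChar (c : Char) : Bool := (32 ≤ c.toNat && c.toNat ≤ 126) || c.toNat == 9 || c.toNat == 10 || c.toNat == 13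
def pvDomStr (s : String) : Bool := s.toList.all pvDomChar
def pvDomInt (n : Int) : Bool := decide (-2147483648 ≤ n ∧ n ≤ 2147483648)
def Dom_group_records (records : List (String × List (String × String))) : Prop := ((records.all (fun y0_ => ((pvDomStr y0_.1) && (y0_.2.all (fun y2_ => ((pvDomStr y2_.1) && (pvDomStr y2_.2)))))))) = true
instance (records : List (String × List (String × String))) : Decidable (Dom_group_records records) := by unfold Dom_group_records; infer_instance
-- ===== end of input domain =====

-- B computes group names first and then builds each group by filtering (alternative
-- decomposition; same return value).  Equivalence is about the RETURN value: A's in-place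
-- update of `records` when a conference/division is literally named 'league' is
-- value-invisible (it rewrites existing keys with their current values).

-- ===== PORT A =====
-- v[field] : record lookup; Pre_ guarantees the key is present (Python raises KeyError otherwise)
def pvField (field : String) (kv : String × List (String × String)) : String :=
  (PySem.Dict.mk kv.2).getD field ""

-- itertools.groupby(items, key): maximal consecutive runs with equal key
def pvRunsBy {α : Type} (f : α → String) : List α → List (String × List α)
  | [] => []
  | x :: xs =>
      (f x, x :: xs.takeWhile (fun y => f y == f x)) ::
        pvRunsBy f (xs.dropWhile (fun y => f y == f x))
  termination_by l => l.length
  decreasing_by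
    simp only [List.length_cons]
    exact Nat.lt_succ_of_le (List.length_dropWhile_le _ _)

-- one 'for value, group in groupby(...)' loop of A
def pvPassA (f : (String × List (String × String)) → String)
    (gr : PySem.Dict String (PySem.Dict String (List (String × String))))
    (items : List (String × List (String × String))) :
    PySem.Dict String (PySem.Dict String (List (String × String))) :=
  (pvRunsBy f items).foldl (fun gr vg =>
    let gr' := if gr.contains vg.1 then gr else gr.insert vg.1 PySem.Dict.empty
    gr'.insert vg.1 ((gr'.getD vg.1 PySem.Dict.empty).update vg.2)) gr

def group_records (records : List (String × List (String × String))) :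
    List (String × List (String × List (String × String))) :=
  let grouped := PySem.Dict.empty.insert "league" (PySem.Dict.mk records)
  let grouped := pvPassA (pvField "conference") grouped records
  let grouped := pvPassA (pvField "division") grouped records
  grouped.items.map (fun p => (p.1, p.2.items))

-- ===== PORT B =====
def pvGroupOf (records : List (String × List (String × String))) (name : String) :
    PySem.Dict String (List (String × String)) :=
  if name == "league" then PySem.Dict.mk records
  else
    (PySem.Dict.ofList (records.filter (fun kv => pvField "conference" kv == name))).update
      (records.filter (fun kv => pvField "division" kv == name))

def group_records_alt (records : List (String × List (String × String))) :
    List (String × List (String × List (String × String))) :=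
  let names : PySem.Set String := ["league"]
  let names := records.foldl (fun ns kv => ns.add (pvField "conference" kv)) names
  let names := records.foldl (fun ns kv => ns.add (pvField "division" kv)) names
  (names.foldl (fun out name => out.insert name (pvGroupOf records name))
      PySem.Dict.empty).items.map (fun p => (p.1, p.2.items))

-- ===== PRECONDITION & SPEC =====
-- Pre_ excludes records missing a 'conference' or 'division' key (Python A raises KeyError
-- there) and association lists with duplicate team keys, which no Python dict can denote.
def Pre_group_records (records : List (String × List (String × String))) : Prop :=
  (records.map Prod.fst).Nodup ∧
    ∀ kv ∈ records, "conference" ∈ kv.2.map Prod.fst ∧ "division" ∈ kv.2.map Prod.fst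
instance (records : List (String × List (String × String))) : Decidable (Pre_group_records records) := by
  unfold Pre_group_records; infer_instance

def pvWitness_group_records : (List (String × List (String × String))) :=
  [("NYR", [("conference", "East"), ("division", "Metro")]),
   ("LAK", [("conference", "West"), ("division", "Pacific")])]

def Spec_group_records (records : List (String × List (String × String))) (out : List (String × List (String × List (String × String)))) : Prop := out = group_records_alt records
instance (records : List (String × List (String × String))) (out : List (String × List (String × List (String × String)))) : Decidable (Spec_group_records records out) := by unfold Spec_group_records; infer_instance

-- ===== CLAIM (what is proved, stated in full; the proofs are below) =====
def Claim_equal_group_records : Prop := ∀ (records : List (String × List (String × String))), Dom_group_records records → Pre_group_records records → Spec_group_records records (group_records records)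

-- ===== LEMMAS AND PROOFS =====

-- per-item version of A's pass: grouped[f kv][kv.1] = kv.2 with setdefault
def pvStep (f : (String × List (String × String)) → String)
    (gr : PySem.Dict String (PySem.Dict String (List (String × String))))
    (kv : String × List (String × String)) :
    PySem.Dict String (PySem.Dict String (List (String × String))) :=
  gr.modify (f kv) PySem.Dict.empty (fun g => g.insert kv.1 kv.2)

def pvPassI (f : (String × List (String × String)) → String)
    (gr : PySem.Dict String (PySem.Dict String (List (String × String))))
    (items : List (String × List (String × String))) :
    PySem.Dict String (PySem.Dict String (List (String × String))) :=
  items.foldl (pvStep f) gr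

theorem pv_insert_noop {κ ν : Type} [BEq κ] [LawfulBEq κ] (d : PySem.Dict κ ν) (k : κ) (v : ν)
    (hnd : d.keys.Nodup) (hm : (k, v) ∈ d.items) : d.insert k v = d := by
  have hc : d.contains k = true := by
    rw [PySem.Dict.contains_iff_mem_keys]
    exact PySem.Dict.mem_keys_of_mem_items d hm
  apply PySem.Dict.ext
  rw [PySem.Dict.items_insert_of_contains d v hc]
  have hp : ∀ p ∈ d.items, (if p.1 == k then (k, v) else p) = p := by
    intro p hpm
    by_cases hpk : p.1 = k
    · have h1 : d.get? k = some v := PySem.Dict.get?_of_mem_items d hm hnd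
      have h2 : d.get? k = some p.2 := by
        have : (k, p.2) ∈ d.items := by rw [← hpk]; exact hpm
        exact PySem.Dict.get?_of_mem_items d this hnd
      have hv : p.2 = v := by rw [h1] at h2; exact (Option.some_inj.mp h2).symm
      have : p = (k, v) := Prod.ext hpk hv
      simp [this]
    · simp [hpk]
  rw [List.map_congr_left hp]
  simp

theorem pv_updnoop (ps : List (String × List (String × String)))
    (d : PySem.Dict String (List (String × String)))
    (hnd : d.keys.Nodup) (hm : ∀ p ∈ ps, p ∈ d.items) :
    ps.foldl (fun g p => g.insert p.1 p.2) d = d := by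
  induction ps with
  | nil => rfl
  | cons p ps ih =>
    have h1 : d.insert p.1 p.2 = d := pv_insert_noop d p.1 p.2 hnd (hm p (by simp))
    simp only [List.foldl_cons, h1]
    exact ih (fun q hq => hm q (by simp [hq]))

theorem pv_run_fold (f : (String × List (String × String)) → String) (c : String) :
    ∀ (run : List (String × List (String × String)))
      (gr : PySem.Dict String (PySem.Dict String (List (String × String)))),
      (∀ y ∈ run, f y = c) → gr.contains c = true → gr.keys.Nodup →
      run.foldl (pvStep f) gr = gr.insert c ((gr.getD c PySem.Dict.empty).update run) := by
  intro run
  induction run with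
  | nil =>
    intro gr _ hcon hnd
    have : ∃ v, gr.get? c = some v := by
      rw [PySem.Dict.contains_eq_isSome_get?] at hcon
      exact Option.isSome_iff_exists.mp hcon
    obtain ⟨v, hv⟩ := this
    have hgd : gr.getD c PySem.Dict.empty = v := PySem.Dict.getD_of_get?_eq_some gr PySem.Dict.empty hv
    have hmem : (c, v) ∈ gr.items := PySem.Dict.mem_items_of_get?_eq_some gr hv
    simp only [List.foldl_nil, PySem.Dict.update, hgd]
    exact (pv_insert_noop gr c v hnd hmem).symm
  | cons y rest ih =>
    intro gr hall hcon hnd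
    have hy : f y = c := hall y (by simp)
    have hstep : pvStep f gr y =
        gr.insert c ((gr.getD c PySem.Dict.empty).insert y.1 y.2) := by
      simp [pvStep, PySem.Dict.modify, hy]
    have h1 := ih (gr.insert c ((gr.getD c PySem.Dict.empty).insert y.1 y.2))
      (fun z hz => hall z (by simp [hz]))
      (PySem.Dict.contains_insert_self _ _ _)
      (PySem.Dict.nodup_keys_insert _ _ _ hnd)
    simp only [List.foldl_cons, hstep, h1, PySem.Dict.getD_insert_self,
      PySem.Dict.insert_insert_self]
    rfl

theorem pv_setdef_insert (gr : PySem.Dict String (PySem.Dict String (List (String × String))))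
    (c : String) (X : PySem.Dict String (List (String × String))) :
    (if gr.contains c then gr else gr.insert c PySem.Dict.empty).insert c X = gr.insert c X := by
  split_ifs with h
  · rfl
  · exact PySem.Dict.insert_insert_self _ _ _ _

theorem pv_setdef_getD (gr : PySem.Dict String (PySem.Dict String (List (String × String))))
    (c : String) :
    (if gr.contains c then gr else gr.insert c PySem.Dict.empty).getD c PySem.Dict.empty =
      gr.getD c PySem.Dict.empty := by
  split_ifs with h
  · rfl
  · rw [PySem.Dict.getD_insert_self,
      PySem.Dict.getD_of_not_contains gr PySem.Dict.empty (by simpa using h)]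

theorem pv_passA_eq (f : (String × List (String × String)) → String) :
    ∀ (n : Nat) (items : List (String × List (String × String)))
      (gr : PySem.Dict String (PySem.Dict String (List (String × String)))),
      items.length ≤ n → gr.keys.Nodup → pvPassA f gr items = pvPassI f gr items := by
  intro n
  induction n with
  | zero =>
    intro items gr hlen _
    have : items = [] := List.eq_nil_of_length_eq_zero (Nat.le_zero.mp hlen)
    subst this
    simp [pvPassA, pvPassI, pvRunsBy]
  | succ n ih =>
    intro items gr hlen hnd
    cases items with
    | nil => simp [pvPassA, pvPassI, pvRunsBy]
    | cons x xs =>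
      set c := f x with hc
      set tw := xs.takeWhile (fun y => f y == f x) with htw
      set dw := xs.dropWhile (fun y => f y == f x) with hdw
      have hallrun : ∀ y ∈ x :: tw, f y = c := by
        intro y hy
        rcases List.mem_cons.mp hy with h | h
        · rw [h]
        · have := List.mem_takeWhile_imp (htw ▸ h)
          simpa using this
      have hgr1 : pvStep f gr x = gr.insert c ((gr.getD c PySem.Dict.empty).insert x.1 x.2) := by
        simp [pvStep, PySem.Dict.modify, hc]
      -- the whole run folded item-by-item
      have hrun : (x :: tw).foldl (pvStep f) gr =
          gr.insert c ((gr.getD c PySem.Dict.empty).update (x :: tw)) := by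
        have h1 := pv_run_fold f c tw (gr.insert c ((gr.getD c PySem.Dict.empty).insert x.1 x.2))
          (fun z hz => hallrun z (by simp [hz]))
          (PySem.Dict.contains_insert_self _ _ _)
          (PySem.Dict.nodup_keys_insert _ _ _ hnd)
        simp only [List.foldl_cons, hgr1, h1, PySem.Dict.getD_insert_self,
          PySem.Dict.insert_insert_self]
        rfl
      -- A's run step equals the same dict
      have hA : pvPassA f gr (x :: xs) =
          pvPassA f (gr.insert c ((gr.getD c PySem.Dict.empty).update (x :: tw))) dw := by
        show (pvRunsBy f (x :: xs)).foldl _ gr = _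
        rw [pvRunsBy]
        simp only [List.foldl_cons]
        have : ((if gr.contains c then gr else gr.insert c PySem.Dict.empty).insert c
            (((if gr.contains c then gr else gr.insert c PySem.Dict.empty).getD c
              PySem.Dict.empty).update (x :: tw))) =
            gr.insert c ((gr.getD c PySem.Dict.empty).update (x :: tw)) := by
          rw [pv_setdef_getD, pv_setdef_insert]
        show (pvRunsBy f dw).foldl _ _ = _
        rw [this]
        rfl
      rw [hA, ih dw _
        (le_trans (le_trans (List.length_dropWhile_le _ _) (by simp at hlen ⊢; omega)) le_rfl)
        (PySem.Dict.nodup_keys_insert _ _ _ hnd)]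
      show pvPassI f _ dw = pvPassI f gr (x :: xs)
      rw [← hrun]
      show dw.foldl (pvStep f) ((x :: tw).foldl (pvStep f) gr) = _
      rw [← List.foldl_append]
      have : (x :: tw) ++ dw = x :: xs := by
        simp only [List.cons_append, htw, hdw, List.takeWhile_append_dropWhile]
      rw [this]
      rfl

theorem pv_passI_getD (f : (String × List (String × String)) → String) :
    ∀ (items : List (String × List (String × String)))
      (gr : PySem.Dict String (PySem.Dict String (List (String × String)))) (c : String),
      (pvPassI f gr items).getD c PySem.Dict.empty =
        (items.filter (fun kv => f kv == c)).foldl (fun g kv => g.insert kv.1 kv.2)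
          (gr.getD c PySem.Dict.empty) := by
  intro items
  induction items with
  | nil => intro gr c; rfl
  | cons x xs ih =>
    intro gr c
    have hstep : pvPassI f gr (x :: xs) = pvPassI f (pvStep f gr x) xs := rfl
    rw [hstep, ih]
    by_cases hfx : f x = c
    · have hb : (f x == c) = true := by simp [hfx]
      have hgd : (pvStep f gr x).getD c PySem.Dict.empty =
          (gr.getD c PySem.Dict.empty).insert x.1 x.2 := by
        show (gr.modify (f x) PySem.Dict.empty _).getD c PySem.Dict.empty = _
        rw [PySem.Dict.getD_modify, if_pos hfx.symm, hfx]
      simp only [List.filter_cons, hb, if_true, List.foldl_cons, hgd]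
    · have hb : (f x == c) = false := by simp [hfx]
      have hgd : (pvStep f gr x).getD c PySem.Dict.empty = gr.getD c PySem.Dict.empty := by
        show (gr.modify (f x) PySem.Dict.empty _).getD c PySem.Dict.empty = _
        rw [PySem.Dict.getD_modify, if_neg (fun h => hfx h.symm)]
      simp only [List.filter_cons, hb, Bool.false_eq_true, if_false, hgd]

theorem pv_passI_keys (f : (String × List (String × String)) → String)
    (items : List (String × List (String × String)))
    (gr : PySem.Dict String (PySem.Dict String (List (String × String)))) :
    (pvPassI f gr items).keys = PySem.Set.update gr.keys (items.map f) :=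
  PySem.Dict.keys_foldl_modify_key items f PySem.Dict.empty
    (fun _ kv g => g.insert kv.1 kv.2) gr

theorem pv_passI_nodup (f : (String × List (String × String)) → String)
    (items : List (String × List (String × String)))
    (gr : PySem.Dict String (PySem.Dict String (List (String × String))))
    (h : gr.keys.Nodup) : (pvPassI f gr items).keys.Nodup :=
  PySem.Dict.nodup_keys_foldl_modify_key items f PySem.Dict.empty
    (fun _ kv g => g.insert kv.1 kv.2) gr h

-- ===== VERDICT (by name: the statement is the Claim_ definition above) =====
theorem group_records_spec : Claim_equal_group_records := by
  intro records _hdom hpre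
  obtain ⟨hnd, -⟩ := hpre
  unfold Spec_group_records
  simp only [group_records, group_records_alt]
  set kc := pvField "conference" with hkc
  set kd := pvField "division" with hkd
  set gr0 := PySem.Dict.empty.insert "league" (PySem.Dict.mk records) with hgr0
  have hkeys0 : gr0.keys = ["league"] := by
    rw [hgr0, PySem.Dict.keys_insert_of_not_contains _ _ (PySem.Dict.contains_empty _)]
    simp [PySem.Dict.keys_empty]
  have hnd0 : gr0.keys.Nodup := by rw [hkeys0]; simp
  have hA1 : pvPassA kc gr0 records = pvPassI kc gr0 records :=
    pv_passA_eq kc records.length records gr0 le_rfl hnd0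
  set grC := pvPassI kc gr0 records with hgrC
  have hndC : grC.keys.Nodup := pv_passI_nodup kc records gr0 hnd0
  have hA2 : pvPassA kd grC records = pvPassI kd grC records :=
    pv_passA_eq kd records.length records grC le_rfl hndC
  set AOuter := pvPassI kd grC records with hAOuter
  have hndA : AOuter.keys.Nodup := pv_passI_nodup kd records grC hndC
  have hkeysA : AOuter.keys =
      PySem.Set.update (PySem.Set.update ["league"] (records.map kc)) (records.map kd) := by
    rw [hAOuter, pv_passI_keys, hgrC, pv_passI_keys, hkeys0]
  have hgd0 : ∀ k, gr0.getD k PySem.Dict.empty =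
      if k = "league" then PySem.Dict.mk records else PySem.Dict.empty := by
    intro k
    rw [hgr0, PySem.Dict.getD_insert]
    split_ifs <;> simp [PySem.Dict.getD_empty]
  have hndrec : (PySem.Dict.mk records).keys.Nodup := hnd
  have hgdA : ∀ k, AOuter.getD k PySem.Dict.empty = pvGroupOf records k := by
    intro k
    rw [hAOuter, pv_passI_getD, hgrC, pv_passI_getD, hgd0 k]
    by_cases hk : k = "league"
    · subst hk
      rw [if_pos rfl]
      rw [pv_updnoop _ _ hndrec (fun p hp => (List.mem_filter.mp hp).1)]
      rw [pv_updnoop _ _ hndrec (fun p hp => (List.mem_filter.mp hp).1)]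
      simp [pvGroupOf]
    · rw [if_neg hk]
      have hkb : (k == "league") = false := by simp [hk]
      simp [pvGroupOf, hkb, PySem.Dict.ofList, PySem.Dict.update, ← hkc, ← hkd]
  rw [hA1, hA2]
  rw [← PySem.Set.update_map_eq_foldl_add records kc ["league"]]
  rw [← PySem.Set.update_map_eq_foldl_add records kd]
  rw [← hkeysA]
  have hBitems : (AOuter.keys.foldl
      (fun out name => out.insert name (pvGroupOf records name)) PySem.Dict.empty).items =
      AOuter.keys.map (fun n => (n, pvGroupOf records n)) := by
    have h := PySem.Dict.items_foldl_insert_fresh AOuter.keys (fun a => a) (pvGroupOf records)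
      PySem.Dict.empty (fun a _ => PySem.Dict.contains_empty a) (by simpa using hndA)
    simpa using h
  rw [hBitems]
  have hitemsA : AOuter.items = AOuter.keys.map (fun n => (n, pvGroupOf records n)) := by
    rw [PySem.Dict.items_eq_map_keys AOuter hndA PySem.Dict.empty]
    exact List.map_congr_left (fun k _ => by rw [hgdA k])
  rw [hitemsA]
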